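-- pv_equiv track=rewrite | github.com/PeanutI3utter/python-logic-evaluator | LogikTable.py | evaland
-- ===== SOURCE A (Python) =====
-- def evaland(string):
--     index = 0
--     while index < len(string) - 1:
--         current = string[index]
--         next = string[index + 1]
--         if current.isdigit() and next.isdigit():
--             string = substring(string, 0, index) + AND(current, next) + substring(string, index + 2, len(string))
--         else:
--             index += 1
--     return string
--
-- def AND(bool1, bool2):
--     if bool1 == "1" and bool2 == "1":
--         return "1"
--     else:
--         return "0"
--
-- def substring(string, indexbegin, indexend):
--     if indexend == 0 or indexbegin >= len(string):
--         return ""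
--     else:
--         return string[indexbegin: indexend]
-- ===== SOURCE B (Python) =====
-- def evaland(string):
--     out = []
--     i = 0
--     n = len(string)
--     while i < n:
--         c = string[i]
--         if c.isdigit():
--             all_one = (c == '1')
--             j = i + 1
--             while j < n and string[j].isdigit():
--                 all_one = all_one and (string[j] == '1')
--                 j += 1
--             if j == i + 1:
--                 out.append(c)
--             else:
--                 out.append('1' if all_one else '0')
--             i = j
--         else:
--             out.append(c)
--             i += 1
--     return ''.join(out)
-- ===== Notes on version B (the rewrite author's own statement) =====
-- stated objective: alternative
-- what changed: A repeatedly rebuilds the whole string, collapsing one adjacent digit pair per iteration (quadratic in the worst case); B makes a single left-to-right pass that groups each maximal digit run, keeps length-one runs verbatim and otherwise emits one digit saying whether the whole run consisted of ones.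
import Mathlib
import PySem

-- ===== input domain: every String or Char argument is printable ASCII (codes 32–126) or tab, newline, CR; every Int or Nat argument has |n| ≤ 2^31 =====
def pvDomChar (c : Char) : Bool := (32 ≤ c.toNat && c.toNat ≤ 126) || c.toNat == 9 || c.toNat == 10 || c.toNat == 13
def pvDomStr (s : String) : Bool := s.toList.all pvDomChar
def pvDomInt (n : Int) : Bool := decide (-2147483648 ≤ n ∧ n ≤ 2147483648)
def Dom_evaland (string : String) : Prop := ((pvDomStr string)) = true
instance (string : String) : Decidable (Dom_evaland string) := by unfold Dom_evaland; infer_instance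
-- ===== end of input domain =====

-- B replaces A's pair-at-a-time string rebuilding with one left-to-right pass over maximal digit runs.

-- ===== PORT A =====
-- Python AND(bool1, bool2) on one-character strings, as Char
def pyAND (b1 b2 : Char) : Char := if b1 == '1' && b2 == '1' then '1' else '0'

-- Python substring(string, indexbegin, indexend); A only calls it with nonnegative ints
def pySubstring (s : List Char) (b e : Nat) : List Char :=
  if e == 0 || decide (s.length ≤ b) then []
  else PySem.List.slice s (some (b : Int)) (some (e : Int))

-- facts about substring cited by loopA's decreasing_by
theorem pySubstring_zero (s : List Char) (e : Nat) : pySubstring s 0 e = s.take e := by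
  unfold pySubstring
  rcases Nat.eq_zero_or_pos e with he | he
  · subst he; simp
  · by_cases hl : s.length = 0
    · simp [List.eq_nil_of_length_eq_zero hl]
    · have hcond : (e == 0 || decide (s.length ≤ 0)) = false := by
        simp only [Bool.or_eq_false_iff, beq_eq_false_iff_ne, decide_eq_false_iff_not]
        omega
      rw [hcond]; simp only [Bool.false_eq_true, if_false]
      rw [PySem.List.slice_natCast]; simp

theorem pySubstring_len (s : List Char) (b : Nat) : pySubstring s b s.length = s.drop b := by
  unfold pySubstring
  by_cases hl : s.length = 0
  · simp [List.eq_nil_of_length_eq_zero hl]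
  · by_cases hb : s.length ≤ b
    · simp [hb, List.drop_eq_nil_of_le hb]
    · have hcond : (s.length == 0 || decide (s.length ≤ b)) = false := by
        simp only [Bool.or_eq_false_iff, beq_eq_false_iff_ne, decide_eq_false_iff_not]
        omega
      rw [hcond]; simp only [Bool.false_eq_true, if_false]
      rw [PySem.List.slice_natCast]
      exact List.take_of_length_le (by simp)

-- the while loop of A, on the string's characters
def loopA (s : List Char) (index : Nat) : List Char :=
  if h : index < s.length - 1 then
    let current := s.getD index ' '
    let next := s.getD (index + 1) ' '
    if PySem.Chars.isdigit current && PySem.Chars.isdigit next then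
      loopA (pySubstring s 0 index ++ [pyAND current next] ++ pySubstring s (index + 2) s.length) index
    else
      loopA s (index + 1)
  else s
termination_by s.length - index
decreasing_by
  · simp [pySubstring_zero, pySubstring_len]; omega
  · omega

def evaland (string : String) : String := String.ofList (loopA string.toList 0)

-- ===== PORT B =====
-- the inner while loop of B: scans the digit run, threading the all-ones flag;
-- returns (all_one, number of extra digits consumed, rest of the list)
def scanRunB : List Char → Bool → Bool × Nat × List Char
  | [], a => (a, 0, [])
  | c :: t, a =>
    if PySem.Chars.isdigit c then
      let r := scanRunB t (a && (c == '1'))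
      (r.1, r.2.1 + 1, r.2.2)
    else (a, 0, c :: t)

-- cited by evalandB's decreasing_by
theorem scanRunB_length : ∀ (l : List Char) (a : Bool), (scanRunB l a).2.2.length ≤ l.length := by
  intro l
  induction l with
  | nil => intro a; simp [scanRunB]
  | cons c t ih =>
    intro a
    by_cases hd : PySem.Chars.isdigit c
    · simp only [scanRunB, hd, if_true]
      exact Nat.le_succ_of_le (ih _)
    · simp [scanRunB, hd]

-- the outer while loop of B
def evalandB : List Char → List Char
  | [] => []
  | c :: t =>
    if PySem.Chars.isdigit c then
      let r := scanRunB t (c == '1')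
      (if r.2.1 == 0 then c else if r.1 then '1' else '0') :: evalandB r.2.2
    else c :: evalandB t
termination_by l => l.length
decreasing_by
  · have := scanRunB_length t (c == '1'); simpa using Nat.lt_succ_of_le this
  · simp

def evaland_alt (string : String) : String := String.ofList (evalandB string.toList)

-- ===== PRECONDITION & SPEC =====
def Spec_evaland (string : String) (out : String) : Prop := out = evaland_alt string
instance (string : String) (out : String) : Decidable (Spec_evaland string out) := by unfold Spec_evaland; infer_instance

-- ===== CLAIM (what is proved, stated in full; the proofs are below) =====
def Claim_equal_evaland : Prop := ∀ (string : String), Dom_evaland string → Spec_evaland string (evaland string)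

-- ===== LEMMAS AND PROOFS =====

theorem scanRunB_k0 (l : List Char) (a : Bool) (h : (scanRunB l a).2.1 = 0) :
    scanRunB l a = (a, 0, l) := by
  cases l with
  | nil => simp [scanRunB]
  | cons c t =>
    by_cases hd : PySem.Chars.isdigit c
    · exfalso; simp [scanRunB, hd] at h
    · simp [scanRunB, hd]

theorem B_short (l : List Char) (h : l.length ≤ 1) : evalandB l = l := by
  match l, h with
  | [], _ => simp [evalandB]
  | [c], _ =>
    by_cases hd : PySem.Chars.isdigit c
    · simp [evalandB, hd, scanRunB]
    · simp [evalandB, hd]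

theorem B_cons_nondig (c : Char) (t : List Char) (h : PySem.Chars.isdigit c = false) :
    evalandB (c :: t) = c :: evalandB t := by
  simp [evalandB, h]

theorem B_cons_dig_nondig (c n : Char) (t : List Char)
    (hc : PySem.Chars.isdigit c = true) (hn : PySem.Chars.isdigit n = false) :
    evalandB (c :: n :: t) = c :: evalandB (n :: t) := by
  rw [evalandB]
  simp [hc, scanRunB, hn]

theorem pyAND_digit (c n : Char) : PySem.Chars.isdigit (pyAND c n) = true := by
  unfold pyAND; split <;> decide

theorem pyAND_eq_one (c n : Char) : (pyAND c n == '1') = ((c == '1') && (n == '1')) := by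
  unfold pyAND
  by_cases h : ((c == '1') && (n == '1')) = true <;> simp [h]

theorem B_collapse (c n : Char) (t : List Char)
    (hc : PySem.Chars.isdigit c = true) (hn : PySem.Chars.isdigit n = true) :
    evalandB (c :: n :: t) = evalandB (pyAND c n :: t) := by
  conv_lhs => rw [evalandB]
  conv_rhs => rw [evalandB]
  rw [if_pos hc, if_pos (pyAND_digit c n)]
  rw [show scanRunB (n :: t) (c == '1')
        = (let r := scanRunB t ((c == '1') && (n == '1'));
           (r.1, r.2.1 + 1, r.2.2)) by simp [scanRunB, hn]]
  rw [pyAND_eq_one]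
  set r := scanRunB t ((c == '1') && (n == '1')) with hr
  by_cases hk : r.2.1 = 0
  · have h0 : r = ((c == '1') && (n == '1'), 0, t) := by rw [hr]; exact scanRunB_k0 _ _ (hr ▸ hk)
    simp only [h0]
    simp [pyAND]
  · have h2 : (r.2.1 == 0) = false := by simpa using hk
    simp [h2]

theorem loopA_eq (s : List Char) (index : Nat)
    (h : index = 0 ∨ PySem.Chars.isdigit (s.getD (index - 1) ' ') = false
       ∨ PySem.Chars.isdigit (s.getD index ' ') = false) :
    loopA s index = s.take index ++ evalandB (s.drop index) := by
  by_cases hlt : index < s.length - 1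
  · have hlen1 : index + 1 < s.length := by omega
    have hlen0 : index < s.length := by omega
    rw [loopA, dif_pos hlt]
    simp only []
    by_cases hd : (PySem.Chars.isdigit (s.getD index ' ') &&
                   PySem.Chars.isdigit (s.getD (index + 1) ' ')) = true
    · -- collapse branch
      rw [if_pos hd]
      obtain ⟨hdc, hdn⟩ := Bool.and_eq_true_iff.mp hd
      rw [pySubstring_zero, pySubstring_len]
      set c := s.getD index ' ' with hc
      set n := s.getD (index + 1) ' ' with hnn
      set s' := s.take index ++ [pyAND c n] ++ s.drop (index + 2) with hs'
      have htklen : (s.take index).length = index := by simp; omega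
      have hpre' : index = 0 ∨ PySem.Chars.isdigit (s'.getD (index - 1) ' ') = false
          ∨ PySem.Chars.isdigit (s'.getD index ' ') = false := by
        rcases Nat.eq_zero_or_pos index with h0 | hpos
        · exact Or.inl h0
        · rcases h with h0 | hnd | hid
          · exact Or.inl h0
          · refine Or.inr (Or.inl ?_)
            have heq : s'.getD (index - 1) ' ' = s.getD (index - 1) ' ' := by
              have hlt' : index - 1 < (s.take index).length := by omega
              rw [hs', List.append_assoc]
              rw [List.getD_eq_getElem?_getD, List.getElem?_append_left hlt']
              rw [List.getD_eq_getElem?_getD, List.getElem?_take_of_lt (by omega)]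
            rw [heq]; exact hnd
          · rw [hc] at hid; rw [hid] at hdc; exact absurd hdc (by simp)
      have ih := loopA_eq s' index hpre'
      rw [ih]
      have h1 : s'.take index = s.take index := by
        rw [hs', List.append_assoc, List.take_append_of_le_length (le_of_eq htklen.symm)]
        simp
      have h2 : s'.drop index = pyAND c n :: s.drop (index + 2) := by
        rw [hs', List.append_assoc, List.drop_append_of_le_length (le_of_eq htklen.symm)]
        simp
      rw [h1, h2]
      have h3 : s.drop index = c :: n :: s.drop (index + 2) := by
        rw [List.drop_eq_getElem_cons hlen0, List.drop_eq_getElem_cons hlen1]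
        rw [hc, hnn, List.getD_eq_getElem _ _ hlen0, List.getD_eq_getElem _ _ hlen1]
      rw [h3, B_collapse c n _ hdc hdn]
    · -- step branch
      rw [if_neg hd]
      have hd' : (PySem.Chars.isdigit (s.getD index ' ') &&
                  PySem.Chars.isdigit (s.getD (index + 1) ' ')) = false := by
        rwa [Bool.not_eq_true] at hd
      have hpre' : index + 1 = 0 ∨ PySem.Chars.isdigit (s.getD (index + 1 - 1) ' ') = false
          ∨ PySem.Chars.isdigit (s.getD (index + 1) ' ') = false := by
        refine Or.inr ?_
        rw [Nat.add_sub_cancel]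
        rcases Bool.and_eq_false_iff.mp hd' with h1 | h1
        · exact Or.inl h1
        · exact Or.inr h1
      have ih := loopA_eq s (index + 1) hpre'
      rw [ih]
      have hts : s.take (index + 1) = s.take index ++ [s.getD index ' '] := by
        rw [List.take_add_one, List.getElem?_eq_getElem hlen0,
            List.getD_eq_getElem _ _ hlen0]
        simp
      have hds : s.drop index = s.getD index ' ' :: s.drop (index + 1) := by
        rw [List.drop_eq_getElem_cons hlen0, List.getD_eq_getElem _ _ hlen0]
      rcases Bool.and_eq_false_iff.mp hd' with h1 | h1
      · rw [hts, hds, B_cons_nondig _ _ h1, List.append_assoc]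
        simp
      · have hds1 : s.drop (index + 1) = s.getD (index + 1) ' ' :: s.drop (index + 2) := by
          rw [List.drop_eq_getElem_cons hlen1, List.getD_eq_getElem _ _ hlen1]
        cases hc0 : PySem.Chars.isdigit (s.getD index ' ') with
        | false =>
          rw [hts, hds, B_cons_nondig _ _ hc0, List.append_assoc]; simp
        | true =>
          rw [hts, hds, hds1, B_cons_dig_nondig _ _ _ hc0 h1, ← hds1, List.append_assoc]
          simp
  · rw [loopA, dif_neg hlt]
    have hdl : (s.drop index).length ≤ 1 := by simp; omega
    rw [B_short _ hdl, List.take_append_drop]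
termination_by s.length - index
decreasing_by
  · simp; omega
  · omega

-- ===== VERDICT (by name: the statement is the Claim_ definition above) =====
theorem evaland_spec : Claim_equal_evaland := by
  intro string _
  unfold Spec_evaland evaland evaland_alt
  rw [loopA_eq string.toList 0 (Or.inl rfl)]
  simp
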